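-- pv_equiv track=rewrite | github.com/DiegoLagosBesoain/Algoritms-and-Competitive_programing | Grafos_backtraking_binarysearch/monkeyleader.py | encontrar_fuerza
-- ===== SOURCE A (Python) =====
-- def encontrar_maxima_diferencia(saltos):
--     max_diferencia = 0
--     for i in range(len(saltos) - 1):
--         diferencia = abs(saltos[i] - saltos[i + 1])
--         if diferencia > max_diferencia:
--             max_diferencia = diferencia
--     return max_diferencia
--
-- def fuerza_valida(saltos,fuerza):
--     fuerza_actual=fuerza
--     for i in range(len(saltos)-1):
--         diferencia=abs(saltos[i]-saltos[i+1])
--         if diferencia>fuerza: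
--             return False
--         if diferencia==fuerza:
--             fuerza_actual-=1
--     if fuerza_actual>=0:
--         return True
--
-- def encontrar_fuerza(saltos):
--     max_diferencia = encontrar_maxima_diferencia(saltos)+len(saltos)-1
--     izquierda = 1
--     derecha = max_diferencia
--     while izquierda < derecha:
--         medio = (izquierda + derecha) // 2
--         if fuerza_valida(saltos, medio):
--             derecha = medio
--         else:
--             izquierda = medio + 1
--     return izquierda
-- ===== SOURCE B (Python) =====
-- def encontrar_fuerza(saltos):
--     m = 0
--     c = 0
--     for a, b in zip(saltos, saltos[1:]):
--         d = abs(a - b)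
--         if d > m:
--             m, c = d, 1
--         elif d == m:
--             c += 1
--     if m == 0:
--         return 1
--     return m if c <= m else m + 1
-- ===== Notes on version B (the rewrite author's own statement) =====
-- stated objective: faster
-- what changed: Replaced the binary search over feasibility (which rescans all adjacent differences at every probe) by a single pass that tracks the maximum adjacent difference M and the number of times it occurs, returning max(1, M if count<=M else M+1).
import Mathlib
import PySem

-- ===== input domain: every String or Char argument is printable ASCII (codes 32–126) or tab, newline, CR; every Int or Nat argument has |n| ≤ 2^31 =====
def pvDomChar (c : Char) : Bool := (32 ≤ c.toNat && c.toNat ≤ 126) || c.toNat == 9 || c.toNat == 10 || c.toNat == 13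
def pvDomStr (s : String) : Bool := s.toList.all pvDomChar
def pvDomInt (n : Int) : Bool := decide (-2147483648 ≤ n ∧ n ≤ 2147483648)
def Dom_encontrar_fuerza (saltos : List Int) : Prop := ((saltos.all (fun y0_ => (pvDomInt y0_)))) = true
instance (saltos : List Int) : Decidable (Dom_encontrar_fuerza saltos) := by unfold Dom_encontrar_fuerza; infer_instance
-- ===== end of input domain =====

-- B replaces A's binary search over feasibility by one pass tracking the maximum
-- adjacent difference and its multiplicity (objective: faster).

-- ===== PORT A =====

-- the 'for i in range(len(saltos)-1)' loop of encontrar_maxima_diferencia, walking the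
-- consecutive pairs saltos[i], saltos[i+1] with accumulator max_diferencia
def emdLoop : List Int → Int → Int
  | a :: b :: rest, max_diferencia =>
      let diferencia := |a - b|
      emdLoop (b :: rest) (if diferencia > max_diferencia then diferencia else max_diferencia)
  | _, max_diferencia => max_diferencia

def encontrar_maxima_diferencia (saltos : List Int) : Int := emdLoop saltos 0

-- the loop of fuerza_valida; Python returns True or falls through to None, and the result
-- is only ever used for truthiness, so the port returns Bool (None ↦ false)
def fvLoop : List Int → Int → Int → Bool
  | a :: b :: rest, fuerza, fuerza_actual =>
      let diferencia := |a - b|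
      if diferencia > fuerza then false
      else if diferencia = fuerza then fvLoop (b :: rest) fuerza (fuerza_actual - 1)
      else fvLoop (b :: rest) fuerza fuerza_actual
  | _, _, fuerza_actual => decide (fuerza_actual ≥ 0)

def fuerza_valida (saltos : List Int) (fuerza : Int) : Bool := fvLoop saltos fuerza fuerza

-- the while-loop of encontrar_fuerza
def bsLoop (saltos : List Int) (izquierda derecha : Int) : Int :=
  if h : izquierda < derecha then
    let medio := PySem.Int.floordiv (izquierda + derecha) 2
    if fuerza_valida saltos medio then bsLoop saltos izquierda medio
    else bsLoop saltos (medio + 1) derecha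
  else izquierda
termination_by (derecha - izquierda).toNat
decreasing_by
  all_goals
    have hdm := PySem.Int.floordiv_mul_add_mod (izquierda + derecha) 2
    have hm0 := PySem.Int.mod_nonneg (izquierda + derecha) (b := 2) (by omega)
    have hm1 := PySem.Int.mod_lt (izquierda + derecha) (b := 2) (by omega)
    simp only [medio] at *
    omega

def encontrar_fuerza (saltos : List Int) : Int :=
  let max_diferencia := encontrar_maxima_diferencia saltos + PySem.List.len saltos - 1
  bsLoop saltos 1 max_diferencia

-- ===== PORT B =====

def encontrar_fuerza_alt (saltos : List Int) : Int :=
  let mc := (List.zip saltos (saltos.drop 1)).foldl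
    (fun (mc : Int × Int) (p : Int × Int) =>
      let d := |p.1 - p.2|
      if d > mc.1 then (d, 1)
      else if d = mc.1 then (mc.1, mc.2 + 1)
      else mc) (0, 0)
  if mc.1 = 0 then 1
  else if mc.2 ≤ mc.1 then mc.1 else mc.1 + 1

-- ===== PRECONDITION & SPEC =====
def Spec_encontrar_fuerza (saltos : List Int) (out : Int) : Prop := out = encontrar_fuerza_alt saltos
instance (saltos : List Int) (out : Int) : Decidable (Spec_encontrar_fuerza saltos out) := by unfold Spec_encontrar_fuerza; infer_instance

-- ===== CLAIM (what is proved, stated in full; the proofs are below) =====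
def Claim_equal_encontrar_fuerza : Prop := ∀ (saltos : List Int), Dom_encontrar_fuerza saltos → Spec_encontrar_fuerza saltos (encontrar_fuerza saltos)

-- ===== LEMMAS AND PROOFS =====

-- the list of adjacent absolute differences both programs are really about
def pvDiffs (saltos : List Int) : List Int :=
  (List.zip saltos (saltos.drop 1)).map (fun p => |p.1 - p.2|)

-- the common value both programs compute: the max adjacent difference M, bumped to M+1
-- when M occurs more than M times, and at least 1
def pvThresh (saltos : List Int) : Int :=
  let M := (pvDiffs saltos).foldl max 0
  if M = 0 then 1
  else if ((pvDiffs saltos).count M : Int) ≤ M then M else M + 1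

lemma pvDiffs_cons (a b : Int) (rest : List Int) :
    pvDiffs (a :: b :: rest) = |a - b| :: pvDiffs (b :: rest) := by
  simp [pvDiffs]

lemma pvDiffs_nonneg (saltos : List Int) : ∀ d ∈ pvDiffs saltos, 0 ≤ d := by
  intro d hd
  obtain ⟨p, _, rfl⟩ := List.mem_map.mp hd
  exact abs_nonneg _

lemma emdLoop_eq (saltos : List Int) :
    ∀ m, emdLoop saltos m = (pvDiffs saltos).foldl max m := by
  induction saltos with
  | nil => intro m; simp [emdLoop, pvDiffs]
  | cons a tail ih =>
    intro m
    cases tail with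
    | nil => simp [emdLoop, pvDiffs]
    | cons b rest =>
      rw [pvDiffs_cons, List.foldl_cons, emdLoop]
      have h : (if |a - b| > m then |a - b| else m) = max m |a - b| := by
        by_cases h : |a - b| > m <;> simp [h] <;> omega
      rw [h]
      exact ih (max m |a - b|)

lemma fvLoop_eq (saltos : List Int) (f : Int) :
    ∀ fa, fvLoop saltos f fa =
      if (pvDiffs saltos).all (fun d => decide (d ≤ f))
      then decide (0 ≤ fa - ((pvDiffs saltos).count f : Int))
      else false := by
  induction saltos with
  | nil => intro fa; simp [fvLoop, pvDiffs]
  | cons a tail ih =>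
    intro fa
    cases tail with
    | nil => simp [fvLoop, pvDiffs]
    | cons b rest =>
      rw [pvDiffs_cons, fvLoop]
      simp only [List.all_cons, List.count_cons]
      by_cases h1 : |a - b| > f
      · have : ¬ (|a - b| ≤ f) := by omega
        simp [h1, this]
      · by_cases h2 : |a - b| = f
        · simp only [ih (fa - 1), h2]
          by_cases h3 : (pvDiffs (b :: rest)).all (fun d => decide (d ≤ f))
          · simp [h3]
          · simp [h3]
        · have hle : |a - b| ≤ f := by omega
          simp only [if_neg h1, if_neg h2, ih fa]
          by_cases h3 : (pvDiffs (b :: rest)).all (fun d => decide (d ≤ f))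
          · simp [h3, hle, h2]
          · simp [h3, hle]

-- a foldl max over a list lands on an element or on the seed
lemma foldl_max_mem (D : List Int) : ∀ a : Int, D.foldl max a = a ∨ D.foldl max a ∈ D := by
  induction D with
  | nil => intro a; left; rfl
  | cons d D ih =>
    intro a
    simp only [List.foldl_cons]
    rcases ih (max a d) with h | h
    · rcases max_choice a d with hm | hm
      · left; rw [h, hm]
      · right; rw [h, hm]; exact List.mem_cons_self
    · right; exact List.mem_cons_of_mem _ h

-- characterization of fuerza_valida as a threshold predicate
lemma valid_iff (saltos : List Int) (hD : pvDiffs saltos ≠ []) (f : Int) :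
    fuerza_valida saltos f = true ↔ pvThresh saltos ≤ f := by
  set D := pvDiffs saltos with hDdef
  set M := D.foldl max 0 with hM
  have hmax := PySem.List.le_foldl_max D (0 : Int)
  have hM0 : 0 ≤ M := hmax.1
  have hMub : ∀ d ∈ D, d ≤ M := hmax.2
  have hMmem : M ∈ D := by
    rcases foldl_max_mem D 0 with h | h
    · obtain ⟨d, hd⟩ := List.exists_mem_of_ne_nil D hD
      have h1 := pvDiffs_nonneg saltos d hd
      have h2 := hMub d hd
      have : d = M := by omega
      rwa [← this]
    · exact h
  have hcount_gt : ∀ g : Int, M < g → D.count g = 0 := by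
    intro g hg
    rw [List.count_eq_zero]
    intro hmem
    exact absurd (hMub g hmem) (by omega)
  have hcntM : 1 ≤ (D.count M : Int) := by
    exact_mod_cast List.count_pos_iff.mpr hMmem
  rw [fuerza_valida, fvLoop_eq saltos f f]
  by_cases hall : D.all (fun d => decide (d ≤ f))
  · have hallp : ∀ d ∈ D, d ≤ f := by
      intro d hd
      simpa using List.all_eq_true.mp hall d hd
    have hfM : M ≤ f := hallp M hMmem
    simp only [← hDdef, hall, if_true, decide_eq_true_eq]
    unfold pvThresh
    simp only [← hDdef, ← hM]
    by_cases hMz : M = 0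
    · rw [if_pos hMz]
      constructor
      · intro h
        rcases lt_or_ge 0 f with hf | hf
        · omega
        · exfalso
          rw [show f = M by omega] at h
          omega
      · intro h1f
        have hc : D.count f = 0 := hcount_gt f (by omega)
        rw [hc]
        omega
    · simp only [if_neg hMz]
      by_cases hc : (D.count M : Int) ≤ M
      · simp only [if_pos hc]
        constructor
        · intro _; exact hfM
        · intro _
          by_cases hfMeq : f = M
          · rw [hfMeq]; omega
          · have : D.count f = 0 := hcount_gt f (by omega)
            omega
      · simp only [if_neg hc]
        constructor
        · intro h
          by_cases hfMeq : f = M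
          · rw [hfMeq] at h; omega
          · omega
        · intro h
          have : D.count f = 0 := hcount_gt f (by omega)
          omega
  · simp only [← hDdef, hall]
    have hex : ∃ d ∈ D, ¬ d ≤ f := by
      have h := List.all_eq_true.not.mp hall
      push Not at h
      obtain ⟨d, hd, hh⟩ := h
      exact ⟨d, hd, by simpa using hh⟩
    obtain ⟨d, hd, hdf⟩ := hex
    have hdM := hMub d hd
    constructor
    · intro h; cases h
    · intro ht
      exfalso
      unfold pvThresh at ht
      simp only [← hDdef, ← hM] at ht
      by_cases hMz : M = 0
      · rw [if_pos hMz] at ht; omega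
      · rw [if_neg hMz] at ht
        by_cases hc : (D.count M : Int) ≤ M
        · rw [if_pos hc] at ht; omega
        · rw [if_neg hc] at ht; omega

-- the binary search with a monotone (threshold) predicate clamps the threshold into [izq, der]
lemma bsLoop_eq (saltos : List Int) (t : Int)
    (hP : ∀ f, fuerza_valida saltos f = true ↔ t ≤ f)
    (izq der : Int) (h : izq ≤ der) :
    bsLoop saltos izq der = max izq (min der t) := by
  rw [bsLoop]
  by_cases hlt : izq < der
  · have hdm := PySem.Int.floordiv_mul_add_mod (izq + der) 2
    have hm0 := PySem.Int.mod_nonneg (izq + der) (b := 2) (by omega)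
    have hm1 := PySem.Int.mod_lt (izq + der) (b := 2) (by omega)
    have hbnd : izq ≤ PySem.Int.floordiv (izq + der) 2 ∧
        PySem.Int.floordiv (izq + der) 2 < der := by omega
    simp only [dif_pos hlt]
    show (if fuerza_valida saltos (PySem.Int.floordiv (izq + der) 2)
          then bsLoop saltos izq (PySem.Int.floordiv (izq + der) 2)
          else bsLoop saltos (PySem.Int.floordiv (izq + der) 2 + 1) der) = max izq (min der t)
    by_cases hv : fuerza_valida saltos (PySem.Int.floordiv (izq + der) 2) = true
    · rw [if_pos hv, bsLoop_eq saltos t hP izq _ hbnd.1]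
      have ht : t ≤ PySem.Int.floordiv (izq + der) 2 := (hP _).mp hv
      omega
    · rw [if_neg hv, bsLoop_eq saltos t hP _ der (by omega)]
      have ht : ¬ t ≤ PySem.Int.floordiv (izq + der) 2 := fun hh => hv ((hP _).mpr hh)
      omega
  · simp only [dif_neg hlt]
    omega
termination_by (der - izq).toNat
decreasing_by all_goals omega

-- B's one-pass fold computes the running max together with the multiplicity of the
-- current max among the differences seen since it was last raised
lemma bfold_eq (D : List Int) : ∀ m c : Int,
    D.foldl (fun (mc : Int × Int) (d : Int) =>
        if d > mc.1 then (d, 1)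
        else if d = mc.1 then (mc.1, mc.2 + 1)
        else mc) (m, c)
      = (D.foldl max m,
         if D.foldl max m = m then c + (D.count m : Int) else (D.count (D.foldl max m) : Int)) := by
  induction D with
  | nil => intro m c; simp
  | cons d D ih =>
    intro m c
    have hmax := PySem.List.le_foldl_max D
    simp only [List.foldl_cons, List.count_cons]
    by_cases h1 : d > m
    · have hmd : max m d = d := by omega
      simp only [if_pos h1, ih d 1, hmd]
      have hF : ¬ D.foldl max d = m := by
        have := (hmax d).1
        omega
      rw [if_neg hF]
      by_cases h2 : D.foldl max d = d
      · simp [h2]; omega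
      · have : ¬ d = D.foldl max d := fun h => h2 h.symm
        simp [h2, this]
    · by_cases h2 : d = m
      · have hmd : max m d = m := by omega
        simp only [if_neg h1, if_pos h2, ih m (c + 1), hmd]
        by_cases h3 : D.foldl max m = m
        · simp [h3, h2]; omega
        · have : ¬ d = D.foldl max m := by rw [h2]; exact fun h => h3 h.symm
          simp [h3, this]
      · have hmd : max m d = m := by omega
        simp only [if_neg h1, if_neg h2, ih m c, hmd]
        by_cases h3 : D.foldl max m = m
        · simp only [h3]
          have : ¬ d = m := h2
          simp [this]
        · have : ¬ d = D.foldl max m := by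
            have := (hmax m).1
            intro h; apply h2; omega
          simp [h3, this]

-- B computes pvThresh
lemma alt_eq_thresh (saltos : List Int) :
    encontrar_fuerza_alt saltos = pvThresh saltos := by
  unfold encontrar_fuerza_alt pvThresh
  have hz : (List.zip saltos (saltos.drop 1)).foldl
      (fun (mc : Int × Int) (p : Int × Int) =>
        let d := |p.1 - p.2|
        if d > mc.1 then (d, 1)
        else if d = mc.1 then (mc.1, mc.2 + 1)
        else mc) (0, 0)
      = (pvDiffs saltos).foldl (fun (mc : Int × Int) (d : Int) =>
        if d > mc.1 then (d, 1)
        else if d = mc.1 then (mc.1, mc.2 + 1)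
        else mc) (0, 0) := by
    rw [pvDiffs, List.foldl_map]
  rw [hz, bfold_eq]
  set M := (pvDiffs saltos).foldl max 0 with hM
  by_cases hMz : M = 0
  · simp [hMz]
  · simp only [if_neg hMz]

-- A computes pvThresh
lemma a_eq_thresh (saltos : List Int) :
    encontrar_fuerza saltos = pvThresh saltos := by
  match saltos with
  | [] =>
    rw [encontrar_fuerza]
    rw [show bsLoop [] 1 (encontrar_maxima_diferencia [] + PySem.List.len [] - 1) = 1 by
      rw [bsLoop]; norm_num [encontrar_maxima_diferencia, emdLoop, PySem.List.len]]
    simp [pvThresh, pvDiffs]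
  | [x] =>
    rw [encontrar_fuerza]
    rw [show bsLoop [x] 1 (encontrar_maxima_diferencia [x] + PySem.List.len [x] - 1) = 1 by
      rw [bsLoop]; norm_num [encontrar_maxima_diferencia, emdLoop, PySem.List.len]]
    simp [pvThresh, pvDiffs]
  | a :: b :: rest =>
    have hD : pvDiffs (a :: b :: rest) ≠ [] := by rw [pvDiffs_cons]; simp
    set xs := a :: b :: rest with hxs
    set D := pvDiffs xs with hDdef
    set M := D.foldl max 0 with hM
    have hmax := PySem.List.le_foldl_max D (0 : Int)
    have hM0 : 0 ≤ M := hmax.1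
    have hMd : encontrar_maxima_diferencia xs = M := by
      rw [encontrar_maxima_diferencia, emdLoop_eq]
    have hlen : PySem.List.len xs = (xs.length : Int) := by
      simp [PySem.List.len_eq]
    have hlen2 : (2 : Int) ≤ (xs.length : Int) := by
      rw [hxs]; simp; omega
    have ht1 : 1 ≤ pvThresh xs ∧ pvThresh xs ≤ M + 1 := by
      unfold pvThresh
      simp only [← hDdef, ← hM]
      by_cases hMz : M = 0
      · simp [hMz]
      · rw [if_neg hMz]
        by_cases hc : (D.count M : Int) ≤ M <;> simp [hc] <;> omega
    rw [encontrar_fuerza]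
    simp only [hMd, hlen]
    rw [bsLoop_eq xs (pvThresh xs) (valid_iff xs hD) 1 (M + (xs.length : Int) - 1) (by omega)]
    omega

theorem encontrar_fuerza_eq (saltos : List Int) :
    encontrar_fuerza saltos = encontrar_fuerza_alt saltos := by
  rw [a_eq_thresh, alt_eq_thresh]

-- ===== VERDICT (by name: the statement is the Claim_ definition above) =====
theorem encontrar_fuerza_spec : Claim_equal_encontrar_fuerza := by
  intro saltos _
  unfold Spec_encontrar_fuerza
  exact encontrar_fuerza_eq saltos
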